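-- pv_equiv track=rewrite | github.com/bertrand-maujean/mpm | src/compile_messages.py | cherche_id
-- ===== SOURCE A (Python) =====
-- messages = []
--
-- def cherche_id(messages):
--     ensemble_id = set();
--     for m in messages:
--         ensemble_id.add(m["id"]);
--
--     result = []
--     for c in ensemble_id:
--         result.append(c);
--
--     result.sort()
--     return result
-- ===== SOURCE B (Python) =====
-- def _insert_unique(lst, v):
--     # insert v into an ascending duplicate-free list, keeping it so
--     if not lst:
--         return [v]
--     head, tail = lst[0], lst[1:]
--     if v < head:
--         return [v] + lst
--     if v == head:
--         return lst
--     return [head] + _insert_unique(tail, v)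
--
-- def cherche_id(messages):
--     result = []
--     for m in messages:
--         result = _insert_unique(result, m["id"])
--     return result
-- ===== Notes on version B (the rewrite author's own statement) =====
-- stated objective: alternative
-- what changed: B keeps a single ascending duplicate-free list and grows it by ordered insertion (insertion sort with dedup at the insertion point) in one pass over the messages, instead of filling a hash set, copying it to a list and sorting it afterwards.
import Mathlib
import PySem

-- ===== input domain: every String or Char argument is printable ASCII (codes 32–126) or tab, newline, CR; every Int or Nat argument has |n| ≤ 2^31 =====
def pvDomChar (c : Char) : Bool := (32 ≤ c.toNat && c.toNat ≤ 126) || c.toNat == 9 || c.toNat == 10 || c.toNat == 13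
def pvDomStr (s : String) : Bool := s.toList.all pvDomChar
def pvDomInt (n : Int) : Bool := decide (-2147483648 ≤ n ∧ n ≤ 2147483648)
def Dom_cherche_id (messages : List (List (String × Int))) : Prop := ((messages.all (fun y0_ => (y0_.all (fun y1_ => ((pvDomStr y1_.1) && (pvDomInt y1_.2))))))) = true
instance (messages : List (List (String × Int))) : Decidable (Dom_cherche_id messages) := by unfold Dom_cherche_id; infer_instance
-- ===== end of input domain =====

-- B grows one ascending duplicate-free list by ordered insertion in a single pass, instead of A's set + copy + sort; equal return values proved on Pre_.

-- ===== PORT A =====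
-- m["id"]  (KeyError when the key is absent — excluded by Pre_; the .getD 0 default is never read under Pre_)
def pvGetId (m : List (String × Int)) : Int := ((PySem.Dict.mk m).get? "id").getD 0

def cherche_id (messages : List (List (String × Int))) : List Int :=
  PySem.List.sorted
    ((messages.foldl (fun s m => PySem.Set.add s (pvGetId m)) PySem.Set.empty).foldl
      (fun r c => r ++ [c]) [])
    (fun x => x) false

-- ===== PORT B =====
-- _insert_unique: insert v into an ascending duplicate-free list, keeping it so
def pvInsertUnique : List Int → Int → List Int
  | [], v => [v]
  | x :: xs, v =>
    if v < x then v :: x :: xs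
    else if v = x then x :: xs
    else x :: pvInsertUnique xs v

def cherche_id_alt (messages : List (List (String × Int))) : List Int :=
  messages.foldl (fun result m => pvInsertUnique result (pvGetId m)) []

-- ===== PRECONDITION & SPEC =====
-- Pre_: every message carries the key "id" (otherwise Python's m["id"] raises KeyError).
def Pre_cherche_id (messages : List (List (String × Int))) : Prop :=
  ∀ m ∈ messages, "id" ∈ m.map Prod.fst
instance (messages : List (List (String × Int))) : Decidable (Pre_cherche_id messages) := by unfold Pre_cherche_id; infer_instance

def pvWitness_cherche_id : (List (List (String × Int))) := [[("id", 3)], [("id", 1), ("x", 7)], [("id", 3)]]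

def Spec_cherche_id (messages : List (List (String × Int))) (out : List Int) : Prop := out = cherche_id_alt messages
instance (messages : List (List (String × Int))) (out : List Int) : Decidable (Spec_cherche_id messages out) := by unfold Spec_cherche_id; infer_instance

-- ===== CLAIM (what is proved, stated in full; the proofs are below) =====
def Claim_equal_cherche_id : Prop := ∀ (messages : List (List (String × Int))), Dom_cherche_id messages → Pre_cherche_id messages → Spec_cherche_id messages (cherche_id messages)

-- ===== LEMMAS AND PROOFS =====

-- ordered insertion keeps the list strictly increasing and adds exactly v to its members
theorem pv_insert_unique (v : Int) : ∀ (l : List Int), l.Pairwise (· < ·) →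
    (pvInsertUnique l v).Pairwise (· < ·) ∧
    (∀ y, y ∈ pvInsertUnique l v ↔ y = v ∨ y ∈ l) := by
  intro l
  induction l with
  | nil => intro _; simp [pvInsertUnique]
  | cons x xs ih =>
    intro hp
    rcases List.pairwise_cons.mp hp with ⟨hx, hxs⟩
    unfold pvInsertUnique
    by_cases h1 : v < x
    · rw [if_pos h1]
      constructor
      · exact List.pairwise_cons.mpr ⟨by
          intro a ha
          rcases List.mem_cons.mp ha with rfl | ha
          · exact h1
          · exact lt_trans h1 (hx a ha), hp⟩
      · intro y; simp [List.mem_cons]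
    · rw [if_neg h1]
      by_cases h2 : v = x
      · rw [if_pos h2]
        exact ⟨hp, by intro y; subst h2; simp [List.mem_cons]⟩
      · rw [if_neg h2]
        have hxv : x < v := by omega
        rcases ih hxs with ⟨hp', hm'⟩
        constructor
        · exact List.pairwise_cons.mpr ⟨by
            intro a ha
            rcases (hm' a).mp ha with rfl | ha
            · exact hxv
            · exact hx a ha, hp'⟩
        · intro y; simp only [List.mem_cons, hm']; tauto

-- the one-pass fold: result strictly increasing, members = acc's ∪ the ids seen
theorem pv_fold_insert : ∀ (ms : List (List (String × Int))) (acc : List Int),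
    acc.Pairwise (· < ·) →
    (ms.foldl (fun r m => pvInsertUnique r (pvGetId m)) acc).Pairwise (· < ·) ∧
    (∀ y, y ∈ ms.foldl (fun r m => pvInsertUnique r (pvGetId m)) acc ↔
      y ∈ acc ∨ y ∈ ms.map pvGetId) := by
  intro ms
  induction ms with
  | nil => intro acc hacc; simpa using hacc
  | cons m ms ih =>
    intro acc hacc
    rcases pv_insert_unique (pvGetId m) acc hacc with ⟨hp, hm⟩
    rcases ih (pvInsertUnique acc (pvGetId m)) hp with ⟨hp', hm'⟩
    refine ⟨hp', fun y => ?_⟩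
    simp only [List.foldl_cons] at *
    rw [hm' y, hm y]
    simp [List.mem_cons]
    tauto

-- ===== VERDICT (by name: the statement is the Claim_ definition above) =====
theorem cherche_id_spec : Claim_equal_cherche_id := by
  intro messages _ _
  unfold Spec_cherche_id cherche_id cherche_id_alt
  -- A side: the set is set(ids), the copy loop is the identity
  rw [PySem.List.foldl_append_singleton_eq_self]
  rw [← PySem.Set.update_map_eq_foldl_add, PySem.Set.update_empty]
  rcases pv_fold_insert messages [] List.Pairwise.nil with ⟨hp, hm⟩
  rw [List.nil_append]
  apply PySem.List.sorted_eq_of_perm_of_pairwise_lt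
  · apply (List.perm_ext_iff_of_nodup (hp.imp ne_of_lt) (PySem.Set.nodup_ofList _)).mpr
    intro y
    rw [hm y, PySem.Set.mem_ofList]
    simp
  · simpa using hp
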